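-- pv_equiv track=rewrite | github.com/kumarvscale/bloom-ssh | bloom/scripts/test_first_behavior.py | parse_behavior_name
-- ===== SOURCE A (Python) =====
-- def parse_behavior_name(comment: str) -> str:
--     """
--     Convert behavior comment path to a slug name.
--     e.g., "Distressed User>Acute Emotional Psychological Distress>Emotional Breakdown"
--     -> "emotional-breakdown"
--     """
--     # Get the last part of the path
--     parts = comment.split(">")
--     name = parts[-1].strip()
--     # Convert to lowercase slug
--     slug = name.lower().replace(" ", "-").replace("/", "-").replace("_", "-")
--     # Remove special characters
--     slug = "".join(c for c in slug if c.isalnum() or c == "-")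
--     # Remove multiple consecutive hyphens
--     while "--" in slug:
--         slug = slug.replace("--", "-")
--     return slug.strip("-")
-- ===== SOURCE B (Python) =====
-- def parse_behavior_name(comment: str) -> str:
--     """Single-pass slugger: emit alnum chars, turning separator runs into one
--     pending hyphen that is only flushed between emitted characters."""
--     name = comment.split(">")[-1].strip().lower()
--     out = []
--     pending = False
--     for c in name:
--         if c.isalnum():
--             if pending and out:
--                 out.append("-")
--             out.append(c)
--             pending = False
--         elif c in " /_-":
--             pending = True
--     return "".join(out)
-- ===== Notes on version B (the rewrite author's own statement) =====
-- stated objective: simpler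
-- what changed: Replaces A's six-stage pipeline (three replace calls, a filter join, a fixpoint while loop collapsing doubled hyphens, and a final two-sided hyphen strip) with one pass over the name keeping a pending-hyphen flag, so no intermediate strings or fixpoint loop are needed.
import Mathlib
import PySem

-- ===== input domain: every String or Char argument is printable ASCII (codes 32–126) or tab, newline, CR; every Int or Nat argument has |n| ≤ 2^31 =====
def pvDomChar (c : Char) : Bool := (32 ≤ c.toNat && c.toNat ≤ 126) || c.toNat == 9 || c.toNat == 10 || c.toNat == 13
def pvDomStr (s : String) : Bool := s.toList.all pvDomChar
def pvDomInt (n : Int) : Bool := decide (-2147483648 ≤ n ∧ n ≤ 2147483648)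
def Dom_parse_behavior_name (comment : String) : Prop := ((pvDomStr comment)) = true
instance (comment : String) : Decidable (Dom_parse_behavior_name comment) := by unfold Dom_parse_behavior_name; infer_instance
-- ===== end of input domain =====

-- B replaces A's replace/filter/while-collapse/strip pipeline with a single pending-hyphen pass; objective: simpler. Return values proved equal on all inputs.

-- ===== PORT A =====

-- helper characterisation of one `slug.replace("--", "-")` step, needed only so the
-- while-loop port below can cite a termination lemma by name
def pvRep1 : List Char → List Char
  | [] => []
  | c :: t => if c = '-' ∧ t.head? = some '-' then '-' :: pvRep1 t.tail else c :: pvRep1 t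
termination_by l => l.length
decreasing_by all_goals (simp [List.length_tail]; try omega)

theorem pvGoRep (fuel : Nat) : ∀ (l acc : List Char), l.length ≤ fuel →
    PySem.Chars.replace.go ['-','-'] ['-'] fuel l acc = acc.reverse ++ pvRep1 l := by
  induction fuel with
  | zero =>
    intro l acc h
    have hl : l = [] := List.length_eq_zero_iff.mp (Nat.le_zero.mp h)
    subst hl
    simp [PySem.Chars.replace.go, pvRep1]
  | succ n ih =>
    intro l acc h
    match l with
    | [] => simp [PySem.Chars.replace.go, pvRep1]
    | [c] =>
      rw [PySem.Chars.replace.go]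
      have hp : List.isPrefixOf ['-','-'] [c] = false := by
        simp [List.isPrefixOf]
      rw [hp, if_neg (by simp)]
      rw [ih [] (c :: acc) (by simp)]
      simp [pvRep1]
    | c :: d :: u =>
      rw [PySem.Chars.replace.go]
      by_cases hc : c = '-' ∧ d = '-'
      · obtain ⟨hc1, hc2⟩ := hc
        subst hc1; subst hc2
        have hp : List.isPrefixOf ['-','-'] ('-' :: '-' :: u) = true := by
          simp [List.isPrefixOf]
        rw [hp, if_pos rfl]
        have hu : u.length ≤ n := by simp at h; omega
        rw [show List.drop (['-','-'] : List Char).length ('-' :: '-' :: u) = u from rfl]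
        rw [ih u (['-'].reverse ++ acc) hu]
        simp [pvRep1]
      · have hp : List.isPrefixOf ['-','-'] (c :: d :: u) = false := by
          simp [List.isPrefixOf]
          intro h1 h2; exact hc ⟨h1.symm, h2.symm⟩
        rw [hp, if_neg (by simp)]
        rw [ih (d :: u) (c :: acc) (by simp at h ⊢; omega)]
        have hcond : ¬ (c = '-' ∧ (d :: u).head? = some '-') := by
          simp only [List.head?_cons, Option.some.injEq]
          exact fun h12 => hc h12
        have he : pvRep1 (c :: d :: u) = c :: pvRep1 (d :: u) := by
          rw [pvRep1, if_neg hcond]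
        rw [he]
        simp

theorem pvReplaceDD (l : List Char) : PySem.Chars.replace l ['-','-'] ['-'] = pvRep1 l := by
  rw [PySem.Chars.replace, if_neg (by simp)]
  rw [pvGoRep l.length l [] le_rfl]
  simp

theorem pvRep1_len_le (l : List Char) : (pvRep1 l).length ≤ l.length := by
  fun_induction pvRep1 l with
  | case1 => simp
  | case2 c t hc ih =>
    simp only [List.length_cons]
    have := List.length_tail (l := t)
    omega
  | case3 c t hc ih => simpa using ih

theorem pvRep1_len_lt (l : List Char) (h : ['-','-'] <:+: l) : (pvRep1 l).length < l.length := by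
  induction l with
  | nil => simp at h
  | cons c t ih =>
    by_cases hc : c = '-' ∧ t.head? = some '-'
    · have h1 := pvRep1_len_le t.tail
      have h2 := List.length_tail (l := t)
      have ht : t ≠ [] := by
        intro e; rw [e] at hc; simp at hc
      have h3 : 1 ≤ t.length := List.length_pos_iff.mpr ht
      rw [pvRep1, if_pos hc]
      simp only [List.length_cons]
      omega
    · simp only [pvRep1, if_neg hc, List.length_cons]
      have ht : ['-','-'] <:+: t := by
        rcases List.infix_cons_iff.mp h with hpre | hinf
        · exfalso
          rcases hpre with ⟨r, hr⟩
          cases hr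
          exact hc ⟨rfl, rfl⟩
        · exact hinf
      have := ih ht
      omega

theorem pvReplaceLenLt (s : String) (h : PySem.Str.isIn "--" s = true) :
    (PySem.Str.replace s "--" "-").toList.length < s.toList.length := by
  have hinf : ['-','-'] <:+: s.toList := (PySem.Str.isIn_iff_infix "--" s).mp h
  rw [PySem.Str.toList_replace]
  rw [show ("--" : String).toList = ['-','-'] from rfl, show ("-" : String).toList = ['-'] from rfl]
  rw [pvReplaceDD]
  exact pvRep1_len_lt _ hinf

-- while "--" in slug: slug = slug.replace("--", "-")
def pyWhileCollapse (s : String) : String :=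
  if h : PySem.Str.isIn "--" s = true then pyWhileCollapse (PySem.Str.replace s "--" "-") else s
termination_by s.toList.length
decreasing_by exact pvReplaceLenLt s h

def parse_behavior_name (comment : String) : String :=
  let parts := (PySem.Str.split? comment ">").getD []
  let name := PySem.Str.strip (PySem.List.pyGetD parts (-1) "")
  let slug := PySem.Str.replace (PySem.Str.replace (PySem.Str.replace (PySem.Str.lower name) " " "-") "/" "-") "_" "-"
  -- "".join(c for c in slug if c.isalnum() or c == "-"): hand-ported character filter, exact
  let slug2 := String.ofList (slug.toList.filter (fun c => PySem.Chars.isalnum c || c == '-'))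
  PySem.Str.stripChars (pyWhileCollapse slug2) "-"

-- ===== PORT B =====

def parse_behavior_name_alt (comment : String) : String :=
  let name := PySem.Str.lower (PySem.Str.strip (PySem.List.pyGetD ((PySem.Str.split? comment ">").getD []) (-1) ""))
  -- for c in name, state (out, pending); `c in " /_-"` is single-character membership, ported exactly as such
  let st := name.toList.foldl (fun (st : List Char × Bool) c =>
      if PySem.Chars.isalnum c then
        (st.1 ++ (if st.2 ∧ st.1 ≠ [] then ['-'] else []) ++ [c], false)
      else if [' ', '/', '_', '-'].contains c then (st.1, true)
      else st) ([], false)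
  String.ofList st.1

-- ===== PRECONDITION & SPEC =====
def Spec_parse_behavior_name (comment : String) (out : String) : Prop := out = parse_behavior_name_alt comment
instance (comment : String) (out : String) : Decidable (Spec_parse_behavior_name comment out) := by unfold Spec_parse_behavior_name; infer_instance

-- ===== CLAIM (what is proved, stated in full; the proofs are below) =====
def Claim_equal_parse_behavior_name : Prop := ∀ (comment : String), Dom_parse_behavior_name comment → Spec_parse_behavior_name comment (parse_behavior_name comment)

-- ===== LEMMAS AND PROOFS =====

-- the run-collapsing fixpoint of the while loop
def pvCollapse : List Char → List Char
  | [] => []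
  | c :: t => if c = '-' ∧ t.head? = some '-' then pvCollapse t else c :: pvCollapse t

-- emitters describing B's state machine output
def pvE : Bool → List Char → List Char
  | _, [] => []
  | pend, c :: t => if c = '-' then pvE true t else (if pend then ['-'] else []) ++ c :: pvE false t

def pvF : List Char → List Char
  | [] => []
  | c :: t => if c = '-' then pvF t else c :: pvE false t

def pvStep2 (st : List Char × Bool) (c : Char) : List Char × Bool :=
  if c = '-' then (st.1, true) else (st.1 ++ (if st.2 ∧ st.1 ≠ [] then ['-'] else []) ++ [c], false)

def pvf (c : Char) : Option Char :=
  if PySem.Chars.isalnum c then some c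
  else if [' ', '/', '_', '-'].contains c then some '-' else none

theorem pvCollapse_eq_self (l : List Char) (h : ¬ ['-','-'] <:+: l) : pvCollapse l = l := by
  induction l with
  | nil => rfl
  | cons c t ih =>
    have hc : ¬ (c = '-' ∧ t.head? = some '-') := by
      rintro ⟨h1, h2⟩
      subst h1
      obtain ⟨u, hu⟩ : ∃ u, t = '-' :: u := by
        cases t with
        | nil => simp at h2
        | cons d u => simp at h2; exact ⟨u, by rw [h2]⟩
      exact h (hu ▸ (List.prefix_iff_eq_take.mpr rfl).isInfix)
    rw [pvCollapse, if_neg hc, ih (fun hin => h (List.infix_cons hin))]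

theorem pvRep1_head? (l : List Char) : (pvRep1 l).head? = l.head? := by
  fun_induction pvRep1 l with
  | case1 => rfl
  | case2 c t hc ih => simp [hc.1]
  | case3 c t hc ih => simp

theorem pvCollapse_rep1 (l : List Char) : pvCollapse (pvRep1 l) = pvCollapse l := by
  fun_induction pvRep1 l with
  | case1 => rfl
  | case2 c t hc ih =>
    obtain ⟨hc1, hc2⟩ := hc
    subst hc1
    obtain ⟨u, hu⟩ : ∃ u, t = '-' :: u := by
      cases t with
      | nil => simp at hc2
      | cons d u => simp at hc2; exact ⟨u, by rw [hc2]⟩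
    subst hu
    simp only [List.tail_cons] at ih ⊢
    rw [show pvCollapse ('-' :: '-' :: u) = pvCollapse ('-' :: u) from by
      rw [pvCollapse, if_pos (by simp)]]
    by_cases hu' : u.head? = some '-'
    · rw [show pvCollapse ('-' :: pvRep1 u) = pvCollapse (pvRep1 u) from by
        rw [pvCollapse, if_pos ⟨rfl, by rw [pvRep1_head?]; exact hu'⟩]]
      rw [show pvCollapse ('-' :: u) = pvCollapse u from by
        rw [pvCollapse, if_pos ⟨rfl, hu'⟩]]
      exact ih
    · rw [show pvCollapse ('-' :: pvRep1 u) = '-' :: pvCollapse (pvRep1 u) from by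
        rw [pvCollapse, if_neg (by rw [pvRep1_head?]; simpa using hu')]]
      rw [show pvCollapse ('-' :: u) = '-' :: pvCollapse u from by
        rw [pvCollapse, if_neg (by simpa using hu')]]
      rw [ih]
  | case3 c t hc ih =>
    have hc' : ¬ (c = '-' ∧ (pvRep1 t).head? = some '-') := by
      rw [pvRep1_head?]; exact hc
    rw [show pvCollapse (c :: pvRep1 t) = c :: pvCollapse (pvRep1 t) from by
      rw [pvCollapse, if_neg hc']]
    rw [pvCollapse, if_neg hc, ih]

theorem pyWhileCollapse_toList (s : String) : (pyWhileCollapse s).toList = pvCollapse s.toList := by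
  fun_induction pyWhileCollapse s with
  | case1 s h ih =>
    rw [ih, PySem.Str.toList_replace]
    rw [show ("--" : String).toList = ['-','-'] from rfl, show ("-" : String).toList = ['-'] from rfl]
    rw [pvReplaceDD]
    exact pvCollapse_rep1 _
  | case2 s h =>
    have : ¬ ['-','-'] <:+: s.toList := fun hin => h ((PySem.Str.isIn_iff_infix "--" s).mpr hin)
    exact (pvCollapse_eq_self _ this).symm

theorem pvR_cons_ne (c : Char) (s : List Char) (hc : c ≠ '-') :
    (List.dropWhile (fun c => ['-'].contains c) (c :: s).reverse).reverse
      = c :: (List.dropWhile (fun c => ['-'].contains c) s.reverse).reverse := by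
  rw [List.reverse_cons, List.dropWhile_append]
  by_cases he : (List.dropWhile (fun c => ['-'].contains c) s.reverse).isEmpty
  · rw [if_pos he]
    rw [List.isEmpty_iff] at he
    rw [he]
    simp [List.dropWhile, hc]
  · rw [if_neg he]
    simp

theorem pvR_cons_of_ne_nil (c : Char) (s : List Char)
    (h : (List.dropWhile (fun c => ['-'].contains c) s.reverse).reverse ≠ []) :
    (List.dropWhile (fun c => ['-'].contains c) (c :: s).reverse).reverse
      = c :: (List.dropWhile (fun c => ['-'].contains c) s.reverse).reverse := by
  rw [List.reverse_cons, List.dropWhile_append]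
  have he : ¬ (List.dropWhile (fun c => ['-'].contains c) s.reverse).isEmpty := by
    rw [List.isEmpty_iff]
    intro e; exact h (by rw [e]; rfl)
  rw [if_neg he]
  simp

theorem pvH (t : List Char) :
    (List.dropWhile (fun c => ['-'].contains c) (pvCollapse t).reverse).reverse = pvE false t ∧
    (List.dropWhile (fun c => ['-'].contains c) (pvCollapse ('-' :: t)).reverse).reverse = pvE true t := by
  induction t with
  | nil =>
    constructor
    · rfl
    · rw [show pvCollapse ['-'] = ['-'] from by rw [pvCollapse, if_neg (by simp)]; rfl]
      rfl
  | cons c u ih =>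
    constructor
    · by_cases hc : c = '-'
      · subst hc
        rw [show pvE false ('-' :: u) = pvE true u from by rw [pvE, if_pos rfl]]
        exact ih.2
      · rw [show pvCollapse (c :: u) = c :: pvCollapse u from by
          rw [pvCollapse, if_neg (by rintro ⟨h1, -⟩; exact hc h1)]]
        rw [pvR_cons_ne c _ hc, ih.1]
        rw [pvE, if_neg hc]
        simp
    · by_cases hc : c = '-'
      · subst hc
        rw [show pvCollapse ('-' :: '-' :: u) = pvCollapse ('-' :: u) from by
          rw [pvCollapse, if_pos (by simp)]]
        rw [show pvE true ('-' :: u) = pvE true u from by rw [pvE, if_pos rfl]]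
        exact ih.2
      · have hcu : pvCollapse (c :: u) = c :: pvCollapse u := by
          rw [pvCollapse, if_neg (by rintro ⟨h1, -⟩; exact hc h1)]
        rw [show pvCollapse ('-' :: c :: u) = '-' :: c :: pvCollapse u from by
          rw [pvCollapse, if_neg (by rintro ⟨-, h2⟩; simp at h2; exact hc h2), hcu]]
        have hinner := pvR_cons_ne c (pvCollapse u) hc
        rw [pvR_cons_of_ne_nil '-' (c :: pvCollapse u) (by rw [hinner]; simp)]
        rw [hinner, ih.1]
        rw [pvE, if_neg hc]
        simp

theorem pvStrip_collapse (m : List Char) :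
    PySem.Chars.stripChars (pvCollapse m) ['-'] = pvF m := by
  rw [PySem.Chars.stripChars]
  induction m with
  | nil => rfl
  | cons c t ih =>
    by_cases hc : c = '-'
    · subst hc
      rw [show pvF ('-' :: t) = pvF t from by rw [pvF, if_pos rfl]]
      have hd : List.dropWhile (fun c => (['-'] : List Char).contains c) (pvCollapse ('-' :: t))
          = List.dropWhile (fun c => (['-'] : List Char).contains c) (pvCollapse t) := by
        by_cases ht : t.head? = some '-'
        · rw [show pvCollapse ('-' :: t) = pvCollapse t from by rw [pvCollapse, if_pos ⟨rfl, ht⟩]]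
        · rw [show pvCollapse ('-' :: t) = '-' :: pvCollapse t from by
            rw [pvCollapse, if_neg (by simpa using ht)]]
          rw [List.dropWhile_cons_of_pos (by simp)]
      rw [hd]
      exact ih
    · rw [show pvCollapse (c :: t) = c :: pvCollapse t from by
        rw [pvCollapse, if_neg (by rintro ⟨h1, -⟩; exact hc h1)]]
      rw [List.dropWhile_cons_of_neg (by simpa using hc)]
      rw [pvR_cons_ne c _ hc]
      rw [pvF, if_neg hc, (pvH t).1]

theorem pvFoldL1 (m : List Char) : ∀ (out : List Char) (pend : Bool), out ≠ [] →
    (List.foldl pvStep2 (out, pend) m).1 = out ++ pvE pend m := by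
  induction m with
  | nil => intro out pend h; simp [pvE]
  | cons c t ih =>
    intro out pend h
    by_cases hc : c = '-'
    · subst hc
      rw [List.foldl_cons, show pvStep2 (out, pend) '-' = (out, true) from by
        rw [pvStep2, if_pos rfl]]
      rw [ih out true h, pvE, if_pos rfl]
    · rw [List.foldl_cons, show pvStep2 (out, pend) c
          = (out ++ (if pend ∧ out ≠ [] then ['-'] else []) ++ [c], false) from by
        rw [pvStep2, if_neg hc]]
      rw [ih _ false (by simp)]
      rw [pvE, if_neg hc]
      have : (if pend ∧ out ≠ [] then (['-'] : List Char) else []) = if pend then ['-'] else [] := by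
        by_cases hp : pend <;> simp [hp, h]
      rw [this]
      simp

theorem pvFoldL2 (m : List Char) : ∀ (pend : Bool),
    (List.foldl pvStep2 (([] : List Char), pend) m).1 = pvF m := by
  induction m with
  | nil => intro pend; rfl
  | cons c t ih =>
    intro pend
    by_cases hc : c = '-'
    · subst hc
      rw [List.foldl_cons, show pvStep2 ([], pend) '-' = ([], true) from by
        rw [pvStep2, if_pos rfl]]
      rw [ih true, pvF, if_pos rfl]
    · rw [List.foldl_cons, show pvStep2 ([], pend) c = ([c], false) from by
        rw [pvStep2, if_neg hc]; simp]
      rw [pvFoldL1 t [c] false (by simp)]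
      rw [pvF, if_neg hc]
      rfl

theorem pvGoMap (a b : Char) (fuel : Nat) : ∀ (l acc : List Char), l.length ≤ fuel →
    PySem.Chars.replace.go [a] [b] fuel l acc
      = acc.reverse ++ l.map (fun c => if c = a then b else c) := by
  induction fuel with
  | zero =>
    intro l acc h
    have hl : l = [] := List.length_eq_zero_iff.mp (Nat.le_zero.mp h)
    subst hl
    simp [PySem.Chars.replace.go]
  | succ n ih =>
    intro l acc h
    match l with
    | [] => simp [PySem.Chars.replace.go]
    | c :: t =>
      rw [PySem.Chars.replace.go]
      by_cases hc : c = a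
      · subst hc
        have hp : List.isPrefixOf [c] (c :: t) = true := by simp [List.isPrefixOf]
        rw [hp, if_pos rfl]
        rw [show List.drop ([c] : List Char).length (c :: t) = t from rfl]
        rw [ih t ([b].reverse ++ acc) (by simpa using Nat.le_of_succ_le_succ h)]
        simp
      · have hp : List.isPrefixOf [a] (c :: t) = false := by
          simp [List.isPrefixOf]
          exact fun e => hc e.symm
        rw [hp, if_neg (by simp)]
        rw [ih t (c :: acc) (by simpa using Nat.le_of_succ_le_succ h)]
        simp [hc]

theorem pvReplaceSingle (a b : Char) (l : List Char) :
    PySem.Chars.replace l [a] [b] = l.map (fun c => if c = a then b else c) := by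
  rw [PySem.Chars.replace, if_neg (by simp)]
  rw [pvGoMap a b l.length l [] le_rfl]
  simp

theorem pvFilterMap_eq (l : List Char) :
    List.filter (fun c => PySem.Chars.isalnum c || c == '-')
      (List.map (fun c => if c = '_' then '-' else c)
        (List.map (fun c => if c = '/' then '-' else c)
          (List.map (fun c => if c = ' ' then '-' else c) l))) = l.filterMap pvf := by
  induction l with
  | nil => rfl
  | cons c t ih =>
    simp only [List.map_cons, List.filter_cons, List.filterMap_cons]
    by_cases ha : PySem.Chars.isalnum c = true
    · have h1 : c ≠ ' ' := by rintro rfl; exact absurd ha (by decide)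
      have h2 : c ≠ '/' := by rintro rfl; exact absurd ha (by decide)
      have h3 : c ≠ '_' := by rintro rfl; exact absurd ha (by decide)
      rw [if_neg h1, if_neg h2, if_neg h3]
      rw [show pvf c = some c from by rw [pvf, if_pos ha]]
      rw [if_pos (by simp [ha]), ih]
    · by_cases hm : ([' ', '/', '_', '-'] : List Char).contains c = true
      · rw [show pvf c = some '-' from by rw [pvf, if_neg ha, if_pos hm]]
        have : List.map (fun c => if c = '_' then '-' else c)
            (List.map (fun c => if c = '/' then '-' else c)
              [if c = ' ' then '-' else c]) = ['-'] := by
          simp at hm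
          rcases hm with rfl | rfl | rfl | rfl <;> simp
        simp only [List.map_cons, List.map_nil] at this ⊢
        rw [List.cons.injEq] at this
        rw [this.1]
        rw [if_pos (by decide), ih]
      · have h1 : c ≠ ' ' := by rintro rfl; simp at hm
        have h2 : c ≠ '/' := by rintro rfl; simp at hm
        have h3 : c ≠ '_' := by rintro rfl; simp at hm
        have h4 : c ≠ '-' := by rintro rfl; simp at hm
        rw [if_neg h1, if_neg h2, if_neg h3]
        rw [show pvf c = none from by rw [pvf, if_neg ha, if_neg (by simpa using hm)]]
        rw [if_neg (by simp [ha, h4])]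
        exact ih

theorem pvFoldB (l : List Char) : ∀ (st : List Char × Bool),
    List.foldl (fun (st : List Char × Bool) c =>
      if PySem.Chars.isalnum c then
        (st.1 ++ (if st.2 ∧ st.1 ≠ [] then ['-'] else []) ++ [c], false)
      else if [' ', '/', '_', '-'].contains c then (st.1, true)
      else st) st l = List.foldl pvStep2 st (l.filterMap pvf) := by
  induction l with
  | nil => intro st; rfl
  | cons c t ih =>
    intro st
    rw [List.foldl_cons, List.filterMap_cons]
    by_cases ha : PySem.Chars.isalnum c = true
    · have hc : c ≠ '-' := by rintro rfl; exact absurd ha (by decide)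
      rw [show pvf c = some c from by rw [pvf, if_pos ha]]
      rw [List.foldl_cons, ih]
      congr 1
      rw [if_pos ha]
      simp only [pvStep2, if_neg hc]
    · by_cases hm : ([' ', '/', '_', '-'] : List Char).contains c = true
      · rw [show pvf c = some '-' from by rw [pvf, if_neg ha, if_pos hm]]
        rw [List.foldl_cons, ih]
        congr 1
        rw [if_neg ha, if_pos hm]
        simp [pvStep2]
      · rw [show pvf c = none from by rw [pvf, if_neg ha, if_neg hm]]
        rw [ih]
        congr 1
        rw [if_neg ha, if_neg hm]

-- ===== VERDICT (by name: the statement is the Claim_ definition above) =====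
theorem parse_behavior_name_spec : Claim_equal_parse_behavior_name := by
  intro comment _
  unfold Spec_parse_behavior_name parse_behavior_name parse_behavior_name_alt
  apply String.toList_inj.mp
  rw [PySem.Str.toList_stripChars, pyWhileCollapse_toList]
  rw [show ("-" : String).toList = ['-'] from rfl]
  rw [String.toList_ofList, String.toList_ofList]
  rw [PySem.Str.toList_replace, PySem.Str.toList_replace, PySem.Str.toList_replace]
  rw [show ("_" : String).toList = ['_'] from rfl, show ("/" : String).toList = ['/'] from rfl,
      show (" " : String).toList = [' '] from rfl, show ("-" : String).toList = ['-'] from rfl]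
  rw [pvReplaceSingle, pvReplaceSingle, pvReplaceSingle]
  rw [pvFilterMap_eq]
  rw [pvStrip_collapse]
  rw [pvFoldB, pvFoldL2]
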